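-- pv_equiv track=rewrite | github.com/cloudblue/connect-extension-for-cb-commerce | cbcext/services/tier_configurations.py | get_last_requests_by_type
-- ===== SOURCE A (Python) =====
-- RETURN_STATUS = ("pending", "inquiring", "approved")
--
-- def get_last_requests_by_type(tier_requests):
--     last_requests = {key: None for key in RETURN_STATUS}
--     for tier_request in tier_requests:
--         status = tier_request.get("status")
--         if status not in last_requests.keys():
--             continue
--
--         if not last_requests.get(status):
--             last_requests[status] = tier_request
--
--     return [_ for _ in last_requests.values() if _ is not None]
-- ===== SOURCE B (Python) =====
-- RETURN_STATUS = ("pending", "inquiring", "approved")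
--
-- def get_last_requests_by_type(tier_requests):
--     reqs = list(tier_requests)
--     result = []
--     for status in RETURN_STATUS:
--         match = next((r for r in reqs if r.get("status") == status), None)
--         if match is not None:
--             result.append(match)
--     return result
-- ===== Notes on version B (the rewrite author's own statement) =====
-- stated objective: simpler
-- what changed: Replaces the single pass that maintains a status-keyed dict (with a truthiness re-check per request) by one find-first scan per status in RETURN_STATUS order, appending each hit directly.
import Mathlib
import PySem

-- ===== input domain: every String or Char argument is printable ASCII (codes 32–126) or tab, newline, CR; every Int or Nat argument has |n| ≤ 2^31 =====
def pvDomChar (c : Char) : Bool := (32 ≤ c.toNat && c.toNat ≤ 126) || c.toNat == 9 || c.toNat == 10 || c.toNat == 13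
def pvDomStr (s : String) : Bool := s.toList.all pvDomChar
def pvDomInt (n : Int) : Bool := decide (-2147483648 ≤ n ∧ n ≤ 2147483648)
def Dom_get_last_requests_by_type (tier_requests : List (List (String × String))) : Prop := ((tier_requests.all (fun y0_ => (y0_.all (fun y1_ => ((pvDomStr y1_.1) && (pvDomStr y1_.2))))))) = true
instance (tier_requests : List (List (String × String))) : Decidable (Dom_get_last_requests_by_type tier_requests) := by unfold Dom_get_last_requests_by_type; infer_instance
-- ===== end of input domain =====

-- B replaces A's single pass over a status-keyed dict by one find-first scan per status; objective: simpler.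


-- shared helper: tier_request.get("status") (first-match association-list lookup)
def pvStatus (r : List (String × String)) : Option String := (PySem.Dict.mk r).get? "status"

def RETURN_STATUS : List String := ["pending", "inquiring", "approved"]

-- ===== PORT A =====
-- dict last_requests; step = one body of the for-loop
def pvStepA (d : PySem.Dict String (Option (List (String × String))))
    (tr : List (String × String)) : PySem.Dict String (Option (List (String × String))) :=
  match pvStatus tr with
  | none => d            -- None is not among the string keys → continue
  | some s =>
    if d.contains s then
      -- if not last_requests.get(status): Python truthiness (None or empty dict is falsy)
      if (match d.getD s none with | some r => !r.isEmpty | none => false) then d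
      else d.insert s (some tr)
    else d

def get_last_requests_by_type (tier_requests : List (List (String × String))) : List (List (String × String)) :=
  -- last_requests = {key: None for key in RETURN_STATUS}; then the for-loop; then the values comprehension
  ((tier_requests.foldl pvStepA
      (RETURN_STATUS.foldl (fun d k => d.insert k none) PySem.Dict.empty)).values).filterMap id

-- ===== PORT B =====
def get_last_requests_by_type_alt (tier_requests : List (List (String × String))) : List (List (String × String)) :=
  RETURN_STATUS.foldl (fun result status =>
    match tier_requests.find? (fun r => pvStatus r == some status) with
    | some m => result ++ [m]
    | none => result) []

-- ===== PRECONDITION & SPEC =====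
def Spec_get_last_requests_by_type (tier_requests : List (List (String × String))) (out : List (List (String × String))) : Prop := out = get_last_requests_by_type_alt tier_requests
instance (tier_requests : List (List (String × String))) (out : List (List (String × String))) : Decidable (Spec_get_last_requests_by_type tier_requests out) := by unfold Spec_get_last_requests_by_type; infer_instance

-- ===== CLAIM (what is proved, stated in full; the proofs are below) =====
def Claim_equal_get_last_requests_by_type : Prop := ∀ (tier_requests : List (List (String × String))), Dom_get_last_requests_by_type tier_requests → Spec_get_last_requests_by_type tier_requests (get_last_requests_by_type tier_requests)

-- ===== LEMMAS AND PROOFS =====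

def pvFind (trs : List (List (String × String))) (s : String) : Option (List (String × String)) :=
  trs.find? (fun r => pvStatus r == some s)

lemma pvStatus_ne_nil {r : List (String × String)} {s : String} (h : pvStatus r = some s) : r ≠ [] := by
  intro hr; subst hr; simp [pvStatus, PySem.Dict.get?] at h

lemma loopA (trs : List (List (String × String))) (a b c : Option (List (String × String)))
    (ha : ∀ r, a = some r → r ≠ [])
    (hb : ∀ r, b = some r → r ≠ [])
    (hc : ∀ r, c = some r → r ≠ []) :
    trs.foldl pvStepA (PySem.Dict.mk [("pending", a), ("inquiring", b), ("approved", c)]) =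
      PySem.Dict.mk [("pending", a.or (pvFind trs "pending")),
                     ("inquiring", b.or (pvFind trs "inquiring")),
                     ("approved", c.or (pvFind trs "approved"))] := by
  induction trs generalizing a b c with
  | nil => simp [pvFind]
  | cons tr rest ih =>
    simp only [List.foldl_cons]
    have hfind : ∀ s : String, pvFind (tr :: rest) s =
        (if pvStatus tr = some s then some tr else pvFind rest s) := by
      intro s; by_cases h : pvStatus tr = some s <;> simp [pvFind, h]
    rcases hst : pvStatus tr with _ | s
    · have hstep : pvStepA (PySem.Dict.mk [("pending", a), ("inquiring", b), ("approved", c)]) tr =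
          PySem.Dict.mk [("pending", a), ("inquiring", b), ("approved", c)] := by
        simp [pvStepA, hst]
      rw [hstep, ih a b c ha hb hc]
      simp [hfind, hst]
    · by_cases hp : s = "pending"
      · subst hp
        rcases a with _ | r
        · have hstep : pvStepA (PySem.Dict.mk [("pending", none), ("inquiring", b), ("approved", c)]) tr =
              PySem.Dict.mk [("pending", some tr), ("inquiring", b), ("approved", c)] := by
            simp [pvStepA, hst, PySem.Dict.contains, PySem.Dict.getD, PySem.Dict.get?, PySem.Dict.insert]
          rw [hstep, ih (some tr) b c (by intro r hr; cases hr; exact pvStatus_ne_nil hst) hb hc]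
          simp [hfind, hst, Option.or]
        · have hne := ha r rfl
          have hstep : pvStepA (PySem.Dict.mk [("pending", some r), ("inquiring", b), ("approved", c)]) tr =
              PySem.Dict.mk [("pending", some r), ("inquiring", b), ("approved", c)] := by
            simp [pvStepA, hst, PySem.Dict.contains, PySem.Dict.getD, PySem.Dict.get?, hne]
          rw [hstep, ih (some r) b c ha hb hc]
          simp [hfind, hst, Option.or]
      · by_cases hi : s = "inquiring"
        · subst hi
          rcases b with _ | r
          · have hstep : pvStepA (PySem.Dict.mk [("pending", a), ("inquiring", none), ("approved", c)]) tr =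
                PySem.Dict.mk [("pending", a), ("inquiring", some tr), ("approved", c)] := by
              simp [pvStepA, hst, PySem.Dict.contains, PySem.Dict.getD, PySem.Dict.get?, PySem.Dict.insert]
            rw [hstep, ih a (some tr) c ha (by intro r hr; cases hr; exact pvStatus_ne_nil hst) hc]
            simp [hfind, hst, Option.or]
          · have hne := hb r rfl
            have hstep : pvStepA (PySem.Dict.mk [("pending", a), ("inquiring", some r), ("approved", c)]) tr =
                PySem.Dict.mk [("pending", a), ("inquiring", some r), ("approved", c)] := by
              simp [pvStepA, hst, PySem.Dict.contains, PySem.Dict.getD, PySem.Dict.get?, hne]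
            rw [hstep, ih a (some r) c ha hb hc]
            simp [hfind, hst, Option.or]
        · by_cases hap : s = "approved"
          · subst hap
            rcases c with _ | r
            · have hstep : pvStepA (PySem.Dict.mk [("pending", a), ("inquiring", b), ("approved", none)]) tr =
                  PySem.Dict.mk [("pending", a), ("inquiring", b), ("approved", some tr)] := by
                simp [pvStepA, hst, PySem.Dict.contains, PySem.Dict.getD, PySem.Dict.get?, PySem.Dict.insert]
              rw [hstep, ih a b (some tr) ha hb (by intro r hr; cases hr; exact pvStatus_ne_nil hst)]
              simp [hfind, hst, Option.or]
            · have hne := hc r rfl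
              have hstep : pvStepA (PySem.Dict.mk [("pending", a), ("inquiring", b), ("approved", some r)]) tr =
                  PySem.Dict.mk [("pending", a), ("inquiring", b), ("approved", some r)] := by
                simp [pvStepA, hst, PySem.Dict.contains, PySem.Dict.getD, PySem.Dict.get?, hne]
              rw [hstep, ih a b (some r) ha hb hc]
              simp [hfind, hst, Option.or]
          · have hp' : ¬ ("pending" = s) := fun h => hp h.symm
            have hi' : ¬ ("inquiring" = s) := fun h => hi h.symm
            have hap' : ¬ ("approved" = s) := fun h => hap h.symm
            have hstep : pvStepA (PySem.Dict.mk [("pending", a), ("inquiring", b), ("approved", c)]) tr =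
                PySem.Dict.mk [("pending", a), ("inquiring", b), ("approved", c)] := by
              simp [pvStepA, hst, PySem.Dict.contains, hp', hi', hap']
            rw [hstep, ih a b c ha hb hc]
            simp [hfind, hst, hp, hi, hap]

lemma alt_closed (trs : List (List (String × String))) :
    get_last_requests_by_type_alt trs =
      (pvFind trs "pending").toList ++ (pvFind trs "inquiring").toList ++ (pvFind trs "approved").toList := by
  simp only [get_last_requests_by_type_alt, RETURN_STATUS, List.foldl_cons, List.foldl_nil]
  rcases hp : trs.find? (fun r => pvStatus r == some "pending") with _ | x <;>
    rcases hi : trs.find? (fun r => pvStatus r == some "inquiring") with _ | y <;>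
      rcases ha : trs.find? (fun r => pvStatus r == some "approved") with _ | z <;>
        simp [pvFind, hp, hi, ha]

-- ===== VERDICT (by name: the statement is the Claim_ definition above) =====
theorem get_last_requests_by_type_spec : Claim_equal_get_last_requests_by_type := by
  intro trs _
  unfold Spec_get_last_requests_by_type get_last_requests_by_type
  have hinit : RETURN_STATUS.foldl (fun d k => d.insert k none) PySem.Dict.empty =
      PySem.Dict.mk [("pending", (none : Option (List (String × String)))), ("inquiring", none), ("approved", none)] := by
    rfl
  rw [hinit, loopA trs none none none (by simp) (by simp) (by simp), alt_closed]
  rcases pvFind trs "pending" with _ | x <;>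
    rcases pvFind trs "inquiring" with _ | y <;>
      rcases pvFind trs "approved" with _ | z <;>
        simp [PySem.Dict.values, Option.or]
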